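-- pv_equiv track=rewrite | github.com/SumitB007/Python_Course | Arrays and lists/tripletsum.py | findTriplet
-- ===== SOURCE A (Python) =====
-- def findTriplet(arr, n, x) :
--     #Your code goes here
--     count=0
--     for i in range(0,n-2):
--         a=arr[i]
--         for j in range(i+1,n-1):
--             b=arr[j]
--             for k in range(j+1,n):
--                 c=arr[k]
--                 if(a+b+c==x):
--                     count=count+1
--                 else:
--                     pass
--
--     #return your answer
--     return count
-- ===== SOURCE B (Python) =====
-- def findTriplet(arr, n, x):
--     # O(n^2): for each middle index j, count complements among earlier
--     # elements via a hash counter, for each later element k.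
--     count = 0
--     seen = {}
--     for j in range(1, n - 1):
--         prev = arr[j - 1]
--         seen[prev] = seen.get(prev, 0) + 1
--         t = x - arr[j]
--         for k in range(j + 1, n):
--             count += seen.get(t - arr[k], 0)
--     return count
-- ===== Notes on version B (the rewrite author's own statement) =====
-- stated objective: faster
-- what changed: Replaced the O(n^3) triple nested index loop by an O(n^2) pass that, for each middle index j, keeps a hash counter of earlier elements and adds the count of the needed complement for each later element k.
import Mathlib
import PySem

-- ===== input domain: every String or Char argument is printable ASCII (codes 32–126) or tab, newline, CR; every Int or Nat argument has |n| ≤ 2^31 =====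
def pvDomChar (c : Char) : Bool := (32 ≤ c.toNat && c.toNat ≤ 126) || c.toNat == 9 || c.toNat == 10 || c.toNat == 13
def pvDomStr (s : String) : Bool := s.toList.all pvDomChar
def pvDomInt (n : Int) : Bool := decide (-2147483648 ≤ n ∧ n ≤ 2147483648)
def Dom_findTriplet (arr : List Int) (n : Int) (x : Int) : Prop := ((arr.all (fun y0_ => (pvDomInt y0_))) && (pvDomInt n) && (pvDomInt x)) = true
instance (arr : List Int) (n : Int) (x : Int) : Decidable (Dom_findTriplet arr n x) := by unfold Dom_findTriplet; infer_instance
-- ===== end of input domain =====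

-- B replaces A's O(n^3) triple nested loop by an O(n^2) pass keeping a hash counter of earlier elements.


-- ===== PORT A =====
def findTriplet (arr : List Int) (n : Int) (x : Int) : Int :=
  (PySem.List.pyRange 0 (n - 2) 1).foldl (fun count i =>
    let a := PySem.List.pyGetD arr i 0
    (PySem.List.pyRange (i + 1) (n - 1) 1).foldl (fun count j =>
      let b := PySem.List.pyGetD arr j 0
      (PySem.List.pyRange (j + 1) n 1).foldl (fun count k =>
        let c := PySem.List.pyGetD arr k 0
        if a + b + c = x then count + 1 else count) count) count) 0

-- ===== PORT B =====
def findTriplet_alt (arr : List Int) (n : Int) (x : Int) : Int :=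
  ((PySem.List.pyRange 1 (n - 1) 1).foldl (fun (st : PySem.Dict Int Int × Int) j =>
      let prev := PySem.List.pyGetD arr (j - 1) 0
      let seen := st.1.insert prev (st.1.getD prev 0 + 1)
      let t := x - PySem.List.pyGetD arr j 0
      (seen, (PySem.List.pyRange (j + 1) n 1).foldl (fun c k =>
        c + seen.getD (t - PySem.List.pyGetD arr k 0) 0) st.2))
    (PySem.Dict.empty, 0)).2

-- ===== PRECONDITION & SPEC =====
-- Pre_ excludes exactly the inputs where A raises IndexError: n ≥ 3 together with n > len(arr).
def Pre_findTriplet (arr : List Int) (n : Int) (x : Int) : Prop := n ≤ arr.length ∨ n < 3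
instance (arr : List Int) (n : Int) (x : Int) : Decidable (Pre_findTriplet arr n x) := by unfold Pre_findTriplet; infer_instance
def pvWitness_findTriplet : List Int × Int × Int := ([1, 2, 3, 0], 4, 6)

def Spec_findTriplet (arr : List Int) (n : Int) (x : Int) (out : Int) : Prop := out = findTriplet_alt arr n x
instance (arr : List Int) (n : Int) (x : Int) (out : Int) : Decidable (Spec_findTriplet arr n x out) := by unfold Spec_findTriplet; infer_instance

-- ===== CLAIM (what is proved, stated in full; the proofs are below) =====
def Claim_equal_findTriplet : Prop := ∀ (arr : List Int) (n : Int) (x : Int), Dom_findTriplet arr n x → Pre_findTriplet arr n x → Spec_findTriplet arr n x (findTriplet arr n x)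

-- ===== LEMMAS AND PROOFS =====

-- swapping two independent list sums
theorem pv_sum_swap (l m : List Int) (h : Int → Int → Int) :
    (l.map (fun u => (m.map (fun v => h u v)).sum)).sum
    = (m.map (fun v => (l.map (fun u => h u v)).sum)).sum := by
  induction l with
  | nil => simp [List.map_const']
  | cons u l ih => simp only [List.map_cons, List.sum_cons, ih, ← PySem.List.sum_map_add_int]

-- swapping a triangular double sum over ranges
theorem pv_tri_swap (g : Int → Int → Int) (a : Int) : ∀ (m : Nat) (b : Int), (b - a).toNat = m →
    ((PySem.List.pyRange a b 1).map (fun i => ((PySem.List.pyRange (i+1) b 1).map (fun j => g i j)).sum)).sum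
    = ((PySem.List.pyRange a b 1).map (fun j => ((PySem.List.pyRange a j 1).map (fun i => g i j)).sum)).sum := by
  intro m
  induction m with
  | zero =>
    intro b hb
    rw [PySem.List.pyRange_one_eq_nil (by omega)]
    simp
  | succ m ih =>
    intro b hb
    have hab : a ≤ b - 1 := by omega
    have hb1 : b = (b - 1) + 1 := by omega
    rw [hb1, PySem.List.pyRange_one_succ_right hab]
    simp only [List.map_append, List.sum_append, List.map_cons, List.map_nil, List.sum_cons,
      List.sum_nil, Int.add_zero]
    rw [show PySem.List.pyRange (b - 1 + 1) (b - 1 + 1) 1 = [] from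
      PySem.List.pyRange_one_eq_nil (le_refl _)]
    simp only [List.map_nil, List.sum_nil, Int.add_zero]
    rw [List.map_congr_left
      (g := fun i => ((PySem.List.pyRange (i+1) (b-1) 1).map (fun j => g i j)).sum + g i (b-1))
      (fun i hi => by
        rw [PySem.List.mem_pyRange_one] at hi
        rw [PySem.List.pyRange_one_succ_right (by omega : i + 1 ≤ b - 1)]
        simp)]
    rw [PySem.List.sum_map_add_int]
    rw [ih (b-1) (by omega)]

-- counter of xs ++ [v] is the Python 'seen[v] = seen.get(v, 0) + 1' step
theorem pv_counter_snoc {κ : Type} [BEq κ] (xs : List κ) (v : κ) :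
    PySem.Dict.counter (xs ++ [v])
    = (PySem.Dict.counter xs).insert v ((PySem.Dict.counter xs).getD v 0 + 1) := by
  rw [← PySem.Dict.foldl_insert_getD_add_one_eq_counter (xs ++ [v]),
    List.foldl_append, PySem.Dict.foldl_insert_getD_add_one_eq_counter]
  rfl

-- A's triple loop as a nested sum of 0/1 indicators
theorem pv_A_sum (arr : List Int) (n x : Int) :
    findTriplet arr n x = ((PySem.List.pyRange 0 (n-2) 1).map (fun i =>
      ((PySem.List.pyRange (i+1) (n-1) 1).map (fun j =>
        ((PySem.List.pyRange (j+1) n 1).map (fun k =>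
          if PySem.List.pyGetD arr i 0 + PySem.List.pyGetD arr j 0 + PySem.List.pyGetD arr k 0 = x
          then (1:Int) else 0)).sum)).sum)).sum := by
  have hk : ∀ (u v c : Int) (l : List Int),
      l.foldl (fun count k => if u + v + PySem.List.pyGetD arr k 0 = x then count + 1 else count) c
      = c + (l.map (fun k => if u + v + PySem.List.pyGetD arr k 0 = x then (1:Int) else 0)).sum := by
    intro u v c l
    rw [PySem.List.foldl_ite_add_one (p := fun k => u + v + PySem.List.pyGetD arr k 0 = x),
      ← PySem.List.sum_map_ite_one_zero (p := fun k => decide (u + v + PySem.List.pyGetD arr k 0 = x))]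
    simp
  have hj : ∀ (u c : Int) (l : List Int),
      l.foldl (fun count j =>
        (PySem.List.pyRange (j+1) n 1).foldl (fun count k =>
          if u + PySem.List.pyGetD arr j 0 + PySem.List.pyGetD arr k 0 = x then count + 1 else count) count) c
      = c + (l.map (fun j => ((PySem.List.pyRange (j+1) n 1).map (fun k =>
          if u + PySem.List.pyGetD arr j 0 + PySem.List.pyGetD arr k 0 = x then (1:Int) else 0)).sum)).sum := by
    intro u c l
    rw [PySem.List.foldl_congr_mem _ _
      (fun count j => count + ((PySem.List.pyRange (j+1) n 1).map (fun k =>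
          if u + PySem.List.pyGetD arr j 0 + PySem.List.pyGetD arr k 0 = x then (1:Int) else 0)).sum) _
      (fun count j _ => hk u (PySem.List.pyGetD arr j 0) count _)]
    rw [PySem.List.foldl_add]
  show (PySem.List.pyRange 0 (n - 2) 1).foldl _ 0 = _
  rw [PySem.List.foldl_congr_mem _ _
      (fun count i => count + ((PySem.List.pyRange (i+1) (n-1) 1).map (fun j =>
        ((PySem.List.pyRange (j+1) n 1).map (fun k =>
          if PySem.List.pyGetD arr i 0 + PySem.List.pyGetD arr j 0 + PySem.List.pyGetD arr k 0 = x
          then (1:Int) else 0)).sum)).sum) _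
      (fun count i _ => hj (PySem.List.pyGetD arr i 0) count _)]
  rw [PySem.List.foldl_add]
  simp

-- B's loop invariant: the dict is the counter of the processed prefix
theorem pv_B_loop (arr : List Int) (n x : Int) : ∀ (m : Nat) (a : Int), 1 ≤ a → (n - 1 - a).toNat = m →
    ∀ (c : Int),
    ((PySem.List.pyRange a (n - 1) 1).foldl (fun (st : PySem.Dict Int Int × Int) j =>
      let prev := PySem.List.pyGetD arr (j - 1) 0
      let seen := st.1.insert prev (st.1.getD prev 0 + 1)
      let t := x - PySem.List.pyGetD arr j 0
      (seen, (PySem.List.pyRange (j + 1) n 1).foldl (fun c k =>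
        c + seen.getD (t - PySem.List.pyGetD arr k 0) 0) st.2))
      (PySem.Dict.counter ((PySem.List.pyRange 0 (a - 1) 1).map (fun i => PySem.List.pyGetD arr i 0)), c)).2
    = c + ((PySem.List.pyRange a (n - 1) 1).map (fun j =>
        ((PySem.List.pyRange (j + 1) n 1).map (fun k =>
          (((PySem.List.pyRange 0 j 1).map (fun i => PySem.List.pyGetD arr i 0)).count
            (x - PySem.List.pyGetD arr j 0 - PySem.List.pyGetD arr k 0) : Int))).sum)).sum := by
  intro m
  induction m with
  | zero =>
    intro a _ hm c
    rw [PySem.List.pyRange_one_eq_nil (show n - 1 ≤ a by omega)]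
    simp
  | succ m ih =>
    intro a ha hm c
    rw [PySem.List.pyRange_one_cons (by omega : a < n - 1)]
    rw [List.foldl_cons]
    simp only []
    have hpre : (PySem.List.pyRange 0 a 1).map (fun i => PySem.List.pyGetD arr i 0)
        = (PySem.List.pyRange 0 (a - 1) 1).map (fun i => PySem.List.pyGetD arr i 0)
          ++ [PySem.List.pyGetD arr (a - 1) 0] := by
      rw [show a = (a - 1) + 1 by omega, PySem.List.pyRange_one_succ_right (by omega : (0:Int) ≤ a - 1)]
      simp
    rw [show ((PySem.List.pyRange 0 (a-1) 1).map (fun i => PySem.List.pyGetD arr i 0)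
          |> PySem.Dict.counter).insert (PySem.List.pyGetD arr (a - 1) 0)
          ((PySem.Dict.counter ((PySem.List.pyRange 0 (a-1) 1).map (fun i => PySem.List.pyGetD arr i 0))).getD (PySem.List.pyGetD arr (a - 1) 0) 0 + 1)
        = PySem.Dict.counter ((PySem.List.pyRange 0 a 1).map (fun i => PySem.List.pyGetD arr i 0)) from by
      rw [hpre, pv_counter_snoc]]
    rw [PySem.List.foldl_add]
    have := ih (a + 1) (by omega) (by omega)
    rw [show a + 1 - 1 = a by omega] at this
    rw [this]
    simp only [PySem.Dict.getD_counter, List.map_cons, List.sum_cons]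
    ring

-- B as a nested sum of prefix counts
theorem pv_B_sum (arr : List Int) (n x : Int) :
    findTriplet_alt arr n x = ((PySem.List.pyRange 1 (n - 1) 1).map (fun j =>
        ((PySem.List.pyRange (j + 1) n 1).map (fun k =>
          (((PySem.List.pyRange 0 j 1).map (fun i => PySem.List.pyGetD arr i 0)).count
            (x - PySem.List.pyGetD arr j 0 - PySem.List.pyGetD arr k 0) : Int))).sum)).sum := by
  have h := pv_B_loop arr n x (n - 1 - 1).toNat 1 le_rfl rfl 0
  rw [show PySem.List.pyRange 0 (1 - 1) 1 = [] from PySem.List.pyRange_one_eq_nil (by omega)] at h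
  simp only [List.map_nil] at h
  rw [show PySem.Dict.counter ([] : List Int) = PySem.Dict.empty from rfl] at h
  rw [show findTriplet_alt arr n x
      = ((PySem.List.pyRange 1 (n - 1) 1).foldl (fun (st : PySem.Dict Int Int × Int) j =>
        let prev := PySem.List.pyGetD arr (j - 1) 0
        let seen := st.1.insert prev (st.1.getD prev 0 + 1)
        let t := x - PySem.List.pyGetD arr j 0
        (seen, (PySem.List.pyRange (j + 1) n 1).foldl (fun c k =>
          c + seen.getD (t - PySem.List.pyGetD arr k 0) 0) st.2))
        (PySem.Dict.empty, 0)).2 from rfl, h]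
  ring

-- the two programs are equal on every input (indices read through pyGetD)
theorem pv_AB_eq (arr : List Int) (n x : Int) : findTriplet arr n x = findTriplet_alt arr n x := by
  rw [pv_A_sum, pv_B_sum]
  -- turn B's prefix count into an indicator sum and swap the two inner sums
  have hBsw : ((PySem.List.pyRange 1 (n - 1) 1).map (fun j =>
        ((PySem.List.pyRange (j + 1) n 1).map (fun k =>
          (((PySem.List.pyRange 0 j 1).map (fun i => PySem.List.pyGetD arr i 0)).count
            (x - PySem.List.pyGetD arr j 0 - PySem.List.pyGetD arr k 0) : Int))).sum)).sum
      = ((PySem.List.pyRange 1 (n-1) 1).map (fun j =>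
        ((PySem.List.pyRange 0 j 1).map (fun i =>
          ((PySem.List.pyRange (j+1) n 1).map (fun k =>
            if PySem.List.pyGetD arr i 0 + PySem.List.pyGetD arr j 0 + PySem.List.pyGetD arr k 0 = x
            then (1:Int) else 0)).sum)).sum)).sum := by
    refine congrArg List.sum (List.map_congr_left (fun j _ => ?_))
    rw [List.map_congr_left
      (g := fun k => ((PySem.List.pyRange 0 j 1).map (fun i =>
        if PySem.List.pyGetD arr i 0 + PySem.List.pyGetD arr j 0 + PySem.List.pyGetD arr k 0 = x
        then (1:Int) else 0)).sum)
      (fun k _ => by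
        rw [List.count_eq_countP, List.countP_map, ← PySem.List.sum_map_ite_one_zero]
        exact congrArg List.sum (List.map_congr_left (fun i _ => by
          simp only [Function.comp_apply, beq_iff_eq]
          exact if_congr (by omega) rfl rfl)))]
    exact pv_sum_swap _ _ _
  -- extend A's outer range from [0, n-2) to [0, n-1): the extra i has an empty j-range
  have e1 : ((PySem.List.pyRange 0 (n-2) 1).map (fun i =>
      ((PySem.List.pyRange (i+1) (n-1) 1).map (fun j =>
        ((PySem.List.pyRange (j+1) n 1).map (fun k =>
          if PySem.List.pyGetD arr i 0 + PySem.List.pyGetD arr j 0 + PySem.List.pyGetD arr k 0 = x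
          then (1:Int) else 0)).sum)).sum)).sum
      = ((PySem.List.pyRange 0 (n-1) 1).map (fun i =>
      ((PySem.List.pyRange (i+1) (n-1) 1).map (fun j =>
        ((PySem.List.pyRange (j+1) n 1).map (fun k =>
          if PySem.List.pyGetD arr i 0 + PySem.List.pyGetD arr j 0 + PySem.List.pyGetD arr k 0 = x
          then (1:Int) else 0)).sum)).sum)).sum := by
    by_cases h2 : 2 ≤ n
    · rw [show PySem.List.pyRange 0 (n-1) 1 = PySem.List.pyRange 0 (n-2) 1 ++ [n-2] from by
        rw [show n-1 = (n-2)+1 by ring]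
        exact PySem.List.pyRange_one_succ_right (by omega)]
      rw [List.map_append, List.sum_append]
      have hnil : PySem.List.pyRange (n-2+1) (n-1) 1 = [] :=
        PySem.List.pyRange_one_eq_nil (by omega)
      simp [hnil]
    · rw [PySem.List.pyRange_one_eq_nil (show n-2 ≤ 0 by omega),
        PySem.List.pyRange_one_eq_nil (show n-1 ≤ 0 by omega)]
  -- extend B's outer range from [1, n-1) to [0, n-1): the extra j = 0 has an empty i-range
  have e2 : ((PySem.List.pyRange 1 (n-1) 1).map (fun j =>
      ((PySem.List.pyRange 0 j 1).map (fun i =>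
        ((PySem.List.pyRange (j+1) n 1).map (fun k =>
          if PySem.List.pyGetD arr i 0 + PySem.List.pyGetD arr j 0 + PySem.List.pyGetD arr k 0 = x
          then (1:Int) else 0)).sum)).sum)).sum
      = ((PySem.List.pyRange 0 (n-1) 1).map (fun j =>
      ((PySem.List.pyRange 0 j 1).map (fun i =>
        ((PySem.List.pyRange (j+1) n 1).map (fun k =>
          if PySem.List.pyGetD arr i 0 + PySem.List.pyGetD arr j 0 + PySem.List.pyGetD arr k 0 = x
          then (1:Int) else 0)).sum)).sum)).sum := by
    by_cases h2 : 2 ≤ n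
    · rw [PySem.List.pyRange_one_cons (show (0:Int) < n-1 by omega)]
      have hnil : PySem.List.pyRange 0 0 1 = [] := PySem.List.pyRange_one_eq_nil le_rfl
      simp [hnil]
    · rw [PySem.List.pyRange_one_eq_nil (show n-1 ≤ 1 by omega),
        PySem.List.pyRange_one_eq_nil (show n-1 ≤ 0 by omega)]
  rw [hBsw, e1, e2]
  exact pv_tri_swap _ 0 (n-1-0).toNat (n-1) rfl

-- ===== VERDICT (by name: the statement is the Claim_ definition above) =====
theorem findTriplet_spec : Claim_equal_findTriplet := by
  intro arr n x _ _
  unfold Spec_findTriplet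
  exact pv_AB_eq arr n x
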